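-- pv_equiv track=rewrite | github.com/BurkeVeble83476n/evidra | scripts/litellm-risk-agent.py | strip_contract_header
-- ===== SOURCE A (Python) =====
-- def strip_contract_header(text: str) -> str:
--     out = []
--     skipped = False
--     for raw_line in text.splitlines():
--         line = raw_line.strip()
--         if not skipped and (not line):
--             continue
--         if not skipped:
--             probe = line
--             if probe.startswith("<!--") and probe.endswith("-->"):
--                 probe = probe[4:-3].strip()
--             if probe.startswith("#"):
--                 probe = probe[1:].strip()
--             if probe.lower().startswith("contract:"):
--                 skipped = True
--                 continue
--         skipped = True
--         out.append(raw_line)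
--     return "\n".join(out).strip()
-- ===== SOURCE B (Python) =====
-- def _is_contract_header(line: str) -> bool:
--     probe = line.strip()
--     if probe.startswith("<!--") and probe.endswith("-->"):
--         probe = probe[4:-3].strip()
--     if probe.startswith("#"):
--         probe = probe[1:].strip()
--     return probe.lower().startswith("contract:")
--
--
-- def strip_contract_header(text: str) -> str:
--     lines = text.splitlines()
--     i = 0
--     n = len(lines)
--     while i < n and not lines[i].strip():
--         i += 1
--     if i < n and _is_contract_header(lines[i]):
--         i += 1
--     return "\n".join(lines[i:]).strip()
-- ===== Notes on version B (the rewrite author's own statement) =====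
-- stated objective: simpler
-- what changed: B computes the boundary index (skip leading blank lines, factor the header test into a predicate, advance past the header if present) and slices the line list once, instead of A's flag-driven loop that appends every surviving line to an accumulator.
import Mathlib
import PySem

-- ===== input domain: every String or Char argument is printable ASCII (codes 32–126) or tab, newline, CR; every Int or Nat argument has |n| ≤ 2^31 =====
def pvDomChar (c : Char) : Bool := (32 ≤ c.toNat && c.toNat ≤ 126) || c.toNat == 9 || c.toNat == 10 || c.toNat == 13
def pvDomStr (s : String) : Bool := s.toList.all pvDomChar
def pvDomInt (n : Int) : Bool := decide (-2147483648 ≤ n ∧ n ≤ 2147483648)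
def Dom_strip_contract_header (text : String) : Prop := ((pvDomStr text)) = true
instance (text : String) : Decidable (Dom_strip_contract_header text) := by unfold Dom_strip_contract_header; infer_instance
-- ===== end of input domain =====

-- B replaces A's flag-driven accumulator loop by: find the boundary index past
-- leading blanks and an optional contract header, slice, join, strip (simpler).

-- ===== PORT A =====
-- one iteration of A's loop; state = (out, skipped)
def pvAStep (st : List String × Bool) (raw_line : String) : List String × Bool :=
  let line := PySem.Str.strip raw_line
  if !st.2 && line == "" then st
  else if !st.2 then
    let probe := line
    let probe := if PySem.Str.startswith probe "<!--" && PySem.Str.endswith probe "-->" then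
        PySem.Str.strip (PySem.Str.slice probe (some 4) (some (-3))) else probe
    let probe := if PySem.Str.startswith probe "#" then
        PySem.Str.strip (PySem.Str.slice probe (some 1) none) else probe
    if PySem.Str.startswith (PySem.Str.lower probe) "contract:" then (st.1, true)
    else (st.1 ++ [raw_line], true)
  else (st.1 ++ [raw_line], true)

def strip_contract_header (text : String) : String :=
  let st := (PySem.Str.splitlines text).foldl pvAStep ([], false)
  PySem.Str.strip (PySem.Str.join "\n" st.1)

-- ===== PORT B =====
def pvIsContractHeader (line : String) : Bool :=
  let probe := PySem.Str.strip line
  let probe := if PySem.Str.startswith probe "<!--" && PySem.Str.endswith probe "-->" then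
      PySem.Str.strip (PySem.Str.slice probe (some 4) (some (-3))) else probe
  let probe := if PySem.Str.startswith probe "#" then
      PySem.Str.strip (PySem.Str.slice probe (some 1) none) else probe
  PySem.Str.startswith (PySem.Str.lower probe) "contract:"

-- the index loop 'while i < n and not lines[i].strip(): i += 1' followed by lines[i:]
def pvSkipBlanks : List String → List String
  | [] => []
  | l :: rest => if PySem.Str.strip l == "" then pvSkipBlanks rest else l :: rest

def strip_contract_header_alt (text : String) : String :=
  let rest := pvSkipBlanks (PySem.Str.splitlines text)
  let rest := match rest with
    | [] => []
    | l :: t => if pvIsContractHeader l then t else l :: t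
  PySem.Str.strip (PySem.Str.join "\n" rest)

-- ===== PRECONDITION & SPEC =====
def Spec_strip_contract_header (text : String) (out : String) : Prop := out = strip_contract_header_alt text
instance (text : String) (out : String) : Decidable (Spec_strip_contract_header text out) := by unfold Spec_strip_contract_header; infer_instance

-- ===== CLAIM (what is proved, stated in full; the proofs are below) =====
def Claim_equal_strip_contract_header : Prop := ∀ (text : String), Dom_strip_contract_header text → Spec_strip_contract_header text (strip_contract_header text)

-- ===== LEMMAS AND PROOFS =====

-- once skipped = true, every remaining line is appended unchanged
theorem pvfold_skipped (ls : List String) (out : List String) :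
    ls.foldl pvAStep (out, true) = (out ++ ls, true) := by
  induction ls generalizing out with
  | nil => simp
  | cons l t ih =>
      simp only [List.foldl_cons, pvAStep]
      simpa using ih (out ++ [l])

-- one iteration of A's loop in the not-yet-skipped state, phrased with B's predicate
theorem pvAStep_false (out : List String) (l : String) :
    pvAStep (out, false) l =
      if PySem.Str.strip l == "" then (out, false)
      else if pvIsContractHeader l then (out, true) else (out ++ [l], true) := by
  simp [pvAStep, pvIsContractHeader]

theorem pvfold_main (ls : List String) :
    (ls.foldl pvAStep ([], false)).1 =
      (match pvSkipBlanks ls with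
       | [] => []
       | l :: t => if pvIsContractHeader l then t else l :: t) := by
  induction ls with
  | nil => simp [pvSkipBlanks]
  | cons l t ih =>
      rw [List.foldl_cons, pvAStep_false]
      by_cases hb : PySem.Str.strip l == ""
      · rw [if_pos hb, pvSkipBlanks, if_pos hb]
        exact ih
      · rw [if_neg hb, pvSkipBlanks, if_neg hb]
        by_cases hh : pvIsContractHeader l = true
        · rw [if_pos hh]
          simp [hh, pvfold_skipped]
        · rw [if_neg hh]
          simp [hh, pvfold_skipped]

-- ===== VERDICT (by name: the statement is the Claim_ definition above) =====
theorem strip_contract_header_spec : Claim_equal_strip_contract_header := by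
  intro text _
  unfold Spec_strip_contract_header strip_contract_header strip_contract_header_alt
  simp only [pvfold_main]
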